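-- pv_equiv track=rewrite | github.com/dream-tentacle/SLR | STLC/term.py | count_outer_bracket
-- ===== SOURCE A (Python) =====
-- def count_outer_bracket(exp):
--     bracket_stack = []
--     corres_end = {}
--     for i, c in enumerate(exp):
--         if c == "(":
--             bracket_stack.append(i)
--         elif c == ")":
--             if len(bracket_stack) == 0:
--                 raise Exception(exp)
--             corres_end[bracket_stack.pop()] = i
--     for i in range(len(exp)):
--         if corres_end.get(i, None) != len(exp) - i - 1:
--             return i
--     return 0
-- ===== SOURCE B (Python) =====
-- def count_outer_bracket(exp):
--     bal = 0
--     for c in exp: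
--         if c == "(":
--             bal += 1
--         elif c == ")":
--             bal -= 1
--             if bal < 0:
--                 raise Exception(exp)
--     lo, hi = 0, len(exp) - 1
--     count = 0
--     while lo < hi and exp[lo] == "(" and exp[hi] == ")":
--         window = exp[lo:hi + 1]
--         depth = 0
--         ok = True
--         for k, c in enumerate(window):
--             if c == "(":
--                 depth += 1
--             elif c == ")":
--                 depth -= 1
--             if depth == 0 and k < len(window) - 1:
--                 ok = False
--                 break
--         if not ok or depth != 0:
--             break
--         count += 1
--         lo += 1
--         hi -= 1
--     return count
-- ===== Notes on version B (the rewrite author's own statement) =====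
-- stated objective: alternative
-- what changed: Replaces the stack-built open-to-close index dictionary plus full index scan by a single balance-validation pass followed by two-pointer concentric-layer peeling, where each layer is accepted by rescanning the window and checking the depth first returns to zero exactly at its right edge.
import Mathlib
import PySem

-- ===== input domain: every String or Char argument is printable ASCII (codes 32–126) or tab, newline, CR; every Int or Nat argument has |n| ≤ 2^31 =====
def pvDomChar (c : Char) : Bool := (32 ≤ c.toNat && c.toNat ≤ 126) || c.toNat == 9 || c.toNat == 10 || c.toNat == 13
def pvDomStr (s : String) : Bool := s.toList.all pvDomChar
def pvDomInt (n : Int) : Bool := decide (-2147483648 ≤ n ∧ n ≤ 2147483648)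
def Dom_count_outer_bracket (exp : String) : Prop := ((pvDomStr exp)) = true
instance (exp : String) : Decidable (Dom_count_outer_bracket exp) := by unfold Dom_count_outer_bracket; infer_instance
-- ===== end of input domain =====

-- B replaces A's stack-built matching-index dictionary by a balance-validation pass plus
-- two-pointer layer peeling with a window rescan per layer (objective: alternative).

-- ===== PORT A =====
-- first loop: build the stack / corres_end dict; none = the `raise Exception(exp)` path
def cobBuild : List (Int × Char) → List Int → PySem.Dict Int Int → Option (PySem.Dict Int Int)
  | [], _, d => some d
  | (i, c) :: rest, st, d =>
    if c = '(' then cobBuild rest (i :: st) d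
    else if c = ')' then
      match st with
      | [] => none
      | top :: st' => cobBuild rest st' (d.insert top i)
    else cobBuild rest st d

-- second loop: first i in range(len(exp)) with corres_end.get(i) != len(exp)-i-1, else 0
def cobScan (d : PySem.Dict Int Int) (n : Int) : List Int → Int
  | [] => 0
  | i :: rest => if d.get? i ≠ some (n - i - 1) then i else cobScan d n rest

def count_outer_bracket (exp : String) : Int :=
  match cobBuild (PySem.List.enumerate exp.toList) [] PySem.Dict.empty with
  | none => 0   -- Python raises here; excluded by Pre_
  | some d =>
      cobScan d (exp.toList.length : Int)
        (PySem.List.pyRange 0 (exp.toList.length : Int) 1)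

-- ===== PORT B =====
-- validation pass: false = the `raise Exception(exp)` path (balance went negative)
def cobVal : List Char → Int → Bool
  | [], _ => true
  | c :: rest, bal =>
    if c = '(' then cobVal rest (bal + 1)
    else if c = ')' then
      if bal - 1 < 0 then false else cobVal rest (bal - 1)
    else cobVal rest bal

-- inner rescan of the window exp[lo:hi+1]: depth must first return to 0 exactly at the end
def cobWin : List Char → Int → Bool
  | [], depth => depth == 0
  | c :: rest, depth =>
    let depth' := if c = '(' then depth + 1 else if c = ')' then depth - 1 else depth
    if depth' = 0 ∧ rest ≠ [] then false else cobWin rest depth'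

-- outer two-pointer loop; count always travels with lo
def cobLayers (l : List Char) (lo hi : Nat) (count : Int) : Int :=
  if h : lo < hi then
    if l[lo]? = some '(' ∧ l[hi]? = some ')' then
      if cobWin ((l.drop lo).take (hi + 1 - lo)) 0 then
        cobLayers l (lo + 1) (hi - 1) (count + 1)
      else count
    else count
  else count
termination_by hi - lo

def count_outer_bracket_alt (exp : String) : Int :=
  let l := exp.toList
  if cobVal l 0 then cobLayers l 0 (l.length - 1) 0 else 0   -- false = raise path, excluded by Pre_

-- ===== PRECONDITION & SPEC =====
-- character weight and prefix balance, used to state the precondition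
def cobW (c : Char) : Int := if c = '(' then 1 else if c = ')' then -1 else 0
def cobBal (l : List Char) : Int := (l.map cobW).sum

-- Pre_ excludes exactly the inputs with a prefix holding more ')' than '(' — there the
-- Python A (and B alike) raises Exception(exp) instead of returning.
def Pre_count_outer_bracket (exp : String) : Prop :=
  ∀ k, k ≤ exp.toList.length → 0 ≤ cobBal (exp.toList.take k)
instance (exp : String) : Decidable (Pre_count_outer_bracket exp) := by
  unfold Pre_count_outer_bracket; infer_instance

def pvWitness_count_outer_bracket : String := "((a)(b))"

def Spec_count_outer_bracket (exp : String) (out : Int) : Prop := out = count_outer_bracket_alt exp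
instance (exp : String) (out : Int) : Decidable (Spec_count_outer_bracket exp out) := by
  unfold Spec_count_outer_bracket; infer_instance

-- ===== CLAIM (what is proved, stated in full; the proofs are below) =====
def Claim_equal_count_outer_bracket : Prop := ∀ (exp : String), Dom_count_outer_bracket exp → Pre_count_outer_bracket exp → Spec_count_outer_bracket exp (count_outer_bracket exp)

-- ===== LEMMAS AND PROOFS =====

-- balance of the index window [p, j): positions p .. j-1 of l
def cobSeg (l : List Char) (p j : Nat) : Int := cobBal ((l.drop p).take (j - p))

-- position q is the matching close bracket of the open bracket at position p
def cobMatches (l : List Char) (p q : Nat) : Prop :=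
  p < q ∧ q < l.length ∧ l[p]? = some '(' ∧
    (∀ j, p < j → j ≤ q → 1 ≤ cobSeg l p j) ∧ cobSeg l p (q + 1) = 0

theorem cobBal_append (xs ys : List Char) : cobBal (xs ++ ys) = cobBal xs + cobBal ys := by
  simp [cobBal]

theorem cobSeg_self (l : List Char) (p : Nat) : cobSeg l p p = 0 := by
  simp [cobSeg, cobBal]

theorem cobSeg_split (l : List Char) {p m j : Nat} (h1 : p ≤ m) (h2 : m ≤ j) :
    cobSeg l p j = cobSeg l p m + cobSeg l m j := by
  unfold cobSeg
  rw [← cobBal_append]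
  congr 1
  have : j - p = (m - p) + (j - m) := by omega
  rw [this, List.take_add]
  congr 1
  rw [List.drop_drop, show p + (m - p) = m from by omega]

theorem cobSeg_succ (l : List Char) {p j : Nat} (hp : p ≤ j) (hj : j < l.length) :
    cobSeg l p (j + 1) = cobSeg l p j + cobW l[j] := by
  rw [cobSeg_split l hp (Nat.le_succ j)]
  have hseg : cobSeg l j (j + 1) = cobW l[j] := by
    unfold cobSeg
    rw [show j + 1 - j = 1 from by omega, List.drop_eq_getElem_cons hj,
      List.take_succ_cons, List.take_zero]
    simp [cobBal]
  rw [hseg]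

theorem cobW_eq_close {c : Char} (h : cobW c = -1) : c = ')' := by
  unfold cobW at h; split_ifs at h <;> simp_all

theorem cobMatches_close {l : List Char} {p q : Nat} (h : cobMatches l p q) : l[q]? = some ')' := by
  obtain ⟨hpq, hq, _, hpos, hz⟩ := h
  have h1 : 1 ≤ cobSeg l p q := hpos q hpq le_rfl
  have h2 : cobSeg l p (q + 1) = cobSeg l p q + cobW l[q] := cobSeg_succ l (Nat.le_of_lt hpq) hq
  have hw : cobW l[q] = -1 := by
    have hb : cobW l[q] ≤ 1 ∧ -1 ≤ cobW l[q] := by unfold cobW; split_ifs; all_goals omega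
    omega
  rw [List.getElem?_eq_getElem hq, cobW_eq_close hw]

theorem cobMatches_right_unique {l : List Char} {p q q' : Nat}
    (h : cobMatches l p q) (h' : cobMatches l p q') : q = q' := by
  by_contra hne
  rcases Nat.lt_or_gt_of_ne hne with hlt | hlt
  · have h1 := h'.2.2.2.1 (q + 1) (Nat.lt_succ_of_lt h.1) (by omega)
    have h2 := h.2.2.2.2
    omega
  · have h1 := h.2.2.2.1 (q' + 1) (Nat.lt_succ_of_lt h'.1) (by omega)
    have h2 := h'.2.2.2.2
    omega

theorem cobMatches_left_unique {l : List Char} {p p' q : Nat}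
    (h : cobMatches l p q) (h' : cobMatches l p' q) : p = p' := by
  by_contra hne
  rcases Nat.lt_or_gt_of_ne hne with hlt | hlt
  · have hsplit : cobSeg l p (q + 1) = cobSeg l p p' + cobSeg l p' (q + 1) :=
      cobSeg_split l (Nat.le_of_lt hlt) (by have := h'.1; omega)
    have h1 : 1 ≤ cobSeg l p p' := h.2.2.2.1 p' hlt (Nat.le_of_lt h'.1)
    have h2 := h.2.2.2.2
    have h3 := h'.2.2.2.2
    omega
  · have hsplit : cobSeg l p' (q + 1) = cobSeg l p' p + cobSeg l p (q + 1) :=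
      cobSeg_split l (Nat.le_of_lt hlt) (by have := h.1; omega)
    have h1 : 1 ≤ cobSeg l p' p := h'.2.2.2.1 p hlt (Nat.le_of_lt h.1)
    have h2 := h.2.2.2.2
    have h3 := h'.2.2.2.2
    omega

-- stack invariant after processing the first k characters
def cobStInv (l : List Char) (k : Nat) (st : List Int) : Prop :=
  (st.length : Int) = cobSeg l 0 k ∧
  ∀ m, (hm : m < st.length) → ∃ p : Nat, st[m] = (p : Int) ∧ p < k ∧ l[p]? = some '(' ∧
    (∀ j, p < j → j ≤ k → 1 ≤ cobSeg l p j) ∧ cobSeg l p k = (m : Int) + 1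

-- dict invariant after processing the first k characters
def cobDInv (l : List Char) (k : Nat) (d : PySem.Dict Int Int) : Prop :=
  ∀ p q : Nat, (d.get? (p : Int) = some (q : Int) ↔ (cobMatches l p q ∧ q < k))

theorem cobBuild_spec (l : List Char) (hpre : ∀ k, k ≤ l.length → 0 ≤ cobBal (l.take k)) :
    ∀ (rest : List Char) (k : Nat) (st : List Int) (d : PySem.Dict Int Int),
      l.drop k = rest → cobStInv l k st → cobDInv l k d →
      ∃ d', cobBuild (PySem.List.enumerate rest (k : Int)) st d = some d' ∧
        cobDInv l l.length d' := by
  intro rest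
  induction rest with
  | nil =>
    intro k st d hdrop _ hD
    have hk : l.length ≤ k := by
      by_contra h
      have := List.drop_eq_nil_iff.mp hdrop
      omega
    refine ⟨d, by simp [PySem.List.enumerate, cobBuild], ?_⟩
    intro p q
    rw [hD p q]
    constructor
    · rintro ⟨hm, _⟩; exact ⟨hm, hm.2.1⟩
    · rintro ⟨hm, _⟩; exact ⟨hm, by have := hm.2.1; omega⟩
  | cons c rest ih =>
    intro k st d hdrop hSt hD
    have hk : k < l.length := by
      by_contra h
      rw [List.drop_eq_nil_iff.mpr (by omega)] at hdrop
      simp at hdrop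
    have hck : l[k]? = some c := by
      have h0 : (l.drop k)[0]? = l[k + 0]? := List.getElem?_drop ..
      rw [hdrop] at h0
      simpa using h0.symm
    have hrest : l.drop (k + 1) = rest := by
      have h1 := congrArg (List.drop 1) hdrop
      rw [List.drop_drop] at h1
      simpa [Nat.add_comm] using h1
    have hsucc : ∀ p, p ≤ k → cobSeg l p (k + 1) = cobSeg l p k + cobW c := by
      intro p hp
      rw [cobSeg_succ l hp hk]
      congr 1
      have hgk : l[k] = c := by
        have h1 := List.getElem?_eq_getElem hk
        rw [hck] at h1
        exact (by injection h1.symm)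
      rw [hgk]
    have henum : PySem.List.enumerate (c :: rest) (k : Int) =
        ((k : Int), c) :: PySem.List.enumerate rest ((k : Nat) + 1 : Nat) := by
      rw [PySem.List.enumerate_cons]
      norm_cast
    -- no cobMatches can close at a position holding something other than ')'
    have hno_close : ∀ (c' : Char), c ≠ ')' → ∀ p q : Nat, cobMatches l p q → q < k + 1 → q < k := by
      intro _ hc p q hm hq
      rcases Nat.lt_or_ge q k with h | h
      · exact h
      · have hqk : q = k := by omega
        have := cobMatches_close hm
        rw [hqk, hck] at this
        exact absurd (by injection this) hc
    rw [henum]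
    by_cases hcop : c = '('
    · -- push k
      subst hcop
      simp only [cobBuild]
      apply ih (k + 1) ((k : Int) :: st) d hrest
      · constructor
        · simp only [List.length_cons]
          have := hSt.1
          rw [hsucc 0 (by omega), show cobW '(' = 1 from rfl]
          push_cast
          omega
        · intro m hm
          match m with
          | 0 =>
            refine ⟨k, rfl, by omega, hck, ?_, ?_⟩
            · intro j hj1 hj2
              have : j = k + 1 := by omega
              subst this
              rw [hsucc k le_rfl, cobSeg_self]
              simp [cobW]
            · rw [hsucc k le_rfl, cobSeg_self]; simp [cobW]
          | m + 1 =>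
            obtain ⟨p, hst, hpk, hchar, hpos, hval⟩ := hSt.2 m (by simpa using Nat.lt_of_succ_lt_succ hm)
            refine ⟨p, by simpa using hst, by omega, hchar, ?_, ?_⟩
            · intro j hj1 hj2
              rcases Nat.lt_or_ge j (k + 1) with h | h
              · exact hpos j hj1 (by omega)
              · have : j = k + 1 := by omega
                subst this
                rw [hsucc p (by omega), hval, show cobW '(' = 1 from rfl]
                omega
            · rw [hsucc p (by omega), hval, show cobW '(' = 1 from rfl]
              push_cast
              ring
      · intro p q
        rw [hD p q]
        constructor
        · rintro ⟨hm, hq⟩; exact ⟨hm, by omega⟩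
        · rintro ⟨hm, hq⟩
          refine ⟨hm, hno_close '(' (by decide) p q hm hq⟩
    · by_cases hccl : c = ')'
      · subst hccl
        simp only [cobBuild, if_neg (by decide : ¬(')' = '('))]
        match st, hSt with
        | [], hSt =>
          -- would raise: contradicts the precondition
          exfalso
          have h0 : cobSeg l 0 k = 0 := by have := hSt.1; simpa using this.symm
          have h1 : cobSeg l 0 (k + 1) = -1 := by
            rw [hsucc 0 (by omega), h0]; simp [cobW]
          have := hpre (k + 1) (by omega)
          have heq : cobBal (l.take (k + 1)) = cobSeg l 0 (k + 1) := by
            simp [cobSeg]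
          omega
        | top :: st', hSt =>
          obtain ⟨p, hst, hpk, hchar, hpos, hval⟩ := hSt.2 0 (by simp)
          simp only [List.getElem_cons_zero] at hst
          subst hst
          have hmatch : cobMatches l p k := by
            refine ⟨hpk, hk, hchar, fun j hj1 hj2 => hpos j hj1 hj2, ?_⟩
            rw [hsucc p (by omega)]
            simp at hval
            simp [cobW, hval]
          apply ih (k + 1) st' (d.insert (p : Int) (k : Int)) hrest
          · constructor
            · have := hSt.1
              rw [hsucc 0 (by omega), show cobW ')' = -1 from rfl]
              simp only [List.length_cons] at this
              push_cast at this ⊢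
              omega
            · intro m hm
              obtain ⟨p', hst', hpk', hchar', hpos', hval'⟩ := hSt.2 (m + 1) (by simpa using Nat.succ_lt_succ hm)
              simp only [List.getElem_cons_succ] at hst'
              refine ⟨p', hst', by omega, hchar', ?_, ?_⟩
              · intro j hj1 hj2
                rcases Nat.lt_or_ge j (k + 1) with h | h
                · exact hpos' j hj1 (by omega)
                · have : j = k + 1 := by omega
                  subst this
                  rw [hsucc p' (by omega), hval', show cobW ')' = -1 from rfl]
                  push_cast
                  omega
              · rw [hsucc p' (by omega), hval', show cobW ')' = -1 from rfl]
                push_cast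
                ring
          · intro p' q'
            rw [PySem.Dict.get?_insert]
            by_cases hp' : (p' : Int) = (p : Int)
            · have hpp : p' = p := by exact_mod_cast hp'
              subst hpp
              rw [if_pos rfl]
              constructor
              · intro h
                have : q' = k := by
                  have := Option.some.injEq ((k : Int)) ((q' : Int)) ▸ h
                  exact_mod_cast (by injection h : (k : Int) = (q' : Int)).symm
                subst this
                exact ⟨hmatch, by omega⟩
              · rintro ⟨hm, _⟩
                have : k = q' := cobMatches_right_unique hmatch hm
                subst this
                rfl
            · rw [if_neg hp', hD p' q']
              constructor
              · rintro ⟨hm, hq⟩; exact ⟨hm, by omega⟩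
              · rintro ⟨hm, hq⟩
                refine ⟨hm, ?_⟩
                rcases Nat.lt_or_ge q' k with h | h
                · exact h
                · exfalso
                  have : q' = k := by omega
                  subst this
                  exact hp' (by exact_mod_cast congrArg (Nat.cast : Nat → Int) (cobMatches_left_unique hm hmatch))
      · -- ordinary character
        simp only [cobBuild, if_neg (by simpa using hcop), if_neg (by simpa using hccl)]
        have hw : cobW c = 0 := by simp [cobW, hcop, hccl]
        apply ih (k + 1) st d hrest
        · constructor
          · rw [hsucc 0 (by omega), hw]
            have := hSt.1
            omega
          · intro m hm
            obtain ⟨p, hst, hpk, hchar, hpos, hval⟩ := hSt.2 m hm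
            refine ⟨p, hst, by omega, hchar, ?_, ?_⟩
            · intro j hj1 hj2
              rcases Nat.lt_or_ge j (k + 1) with h | h
              · exact hpos j hj1 (by omega)
              · have : j = k + 1 := by omega
                subst this
                rw [hsucc p (by omega), hval, hw]
                omega
            · rw [hsucc p (by omega), hval, hw]; ring
        · intro p q
          rw [hD p q]
          constructor
          · rintro ⟨hm, hq⟩; exact ⟨hm, by omega⟩
          · rintro ⟨hm, hq⟩
            exact ⟨hm, hno_close c hccl p q hm hq⟩

-- the validation pass succeeds under the precondition
theorem cobVal_of_pre (l : List Char) (hpre : ∀ k, k ≤ l.length → 0 ≤ cobBal (l.take k)) :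
    ∀ (rest : List Char) (k : Nat), l.drop k = rest → cobVal rest (cobSeg l 0 k) = true := by
  intro rest
  induction rest with
  | nil => intro k _; simp [cobVal]
  | cons c rest ih =>
    intro k hdrop
    have hk : k < l.length := by
      by_contra h
      rw [List.drop_eq_nil_iff.mpr (by omega)] at hdrop
      simp at hdrop
    have hrest : l.drop (k + 1) = rest := by
      have h1 := congrArg (List.drop 1) hdrop
      rw [List.drop_drop] at h1
      simpa [Nat.add_comm] using h1
    have hck : l[k] = c := by
      have h0 : (l.drop k)[0]? = l[k + 0]? := List.getElem?_drop ..
      rw [hdrop] at h0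
      have : l[k]? = some c := by simpa using h0.symm
      rw [List.getElem?_eq_getElem hk] at this
      injection this
    have hsucc : cobSeg l 0 (k + 1) = cobSeg l 0 k + cobW c := by
      rw [cobSeg_succ l (by omega) hk, hck]
    by_cases hcop : c = '('
    · subst hcop
      simp only [cobVal]
      have : cobSeg l 0 k + 1 = cobSeg l 0 (k + 1) := by
        rw [hsucc, show cobW '(' = 1 from rfl]
      rw [this]
      exact ih (k + 1) hrest
    · by_cases hccl : c = ')'
      · subst hccl
        simp only [cobVal, if_neg (by decide : ¬(')' = '('))]
        have hnext : cobSeg l 0 k - 1 = cobSeg l 0 (k + 1) := by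
          rw [hsucc, show cobW ')' = -1 from rfl]; ring
        have hge : 0 ≤ cobSeg l 0 (k + 1) := by
          have := hpre (k + 1) (by omega)
          simpa [cobSeg] using this
        have hcond : ¬(cobSeg l 0 k - 1 < 0) := by omega
        rw [if_neg hcond, hnext]
        exact ih (k + 1) hrest
      · simp only [cobVal, if_neg (by simpa using hcop), if_neg (by simpa using hccl)]
        have : cobSeg l 0 k = cobSeg l 0 (k + 1) := by
          rw [hsucc]; simp [cobW, hcop, hccl]
        rw [this]
        exact ih (k + 1) hrest

-- characterization of the window rescan
theorem cobWin_iff (ws : List Char) : ∀ depth : Int, cobWin ws depth = true ↔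
    ((∀ m, 1 ≤ m → m < ws.length → depth + cobBal (ws.take m) ≠ 0) ∧ depth + cobBal ws = 0) := by
  induction ws with
  | nil => intro depth; simp [cobWin, cobBal]
  | cons c rest ih =>
    intro depth
    have hd' : (if c = '(' then depth + 1 else if c = ')' then depth - 1 else depth) = depth + cobW c := by
      unfold cobW; split_ifs <;> ring
    have htake : ∀ m : Nat, cobBal ((c :: rest).take (m + 1)) = cobW c + cobBal (rest.take m) := by
      intro m
      simp [List.take_succ_cons, cobBal]
    simp only [cobWin, hd']
    by_cases hstop : depth + cobW c = 0 ∧ rest ≠ []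
    · rw [if_pos hstop]
      simp only [Bool.false_eq_true, false_iff]
      rintro ⟨hall, -⟩
      have hlen : 1 < (c :: rest).length := by
        cases rest with
        | nil => exact absurd rfl hstop.2
        | cons _ _ => simp
      have := hall 1 le_rfl hlen
      apply this
      rw [show (1 : Nat) = 0 + 1 from rfl, htake 0]
      simp [cobBal]
      omega
    · rw [if_neg hstop, ih (depth + cobW c)]
      constructor
      · rintro ⟨hne, hfin⟩
        refine ⟨?_, ?_⟩
        · intro m hm1 hm2
          match m, hm1 with
          | 1, _ =>
            rw [htake 0]
            simp only [List.take_zero, cobBal, List.map_nil, List.sum_nil, add_zero]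
            intro h0
            cases rest with
            | nil => simp at hm2
            | cons _ _ => exact hstop ⟨by omega, by simp⟩
          | (m + 2), _ =>
            rw [htake (m + 1)]
            have := hne (m + 1) (by omega) (by simpa using Nat.lt_of_succ_lt_succ hm2)
            intro h; apply this; omega
        · simp only [cobBal, List.map_cons, List.sum_cons] at *
          omega
      · rintro ⟨hne, hfin⟩
        refine ⟨?_, ?_⟩
        · intro m hm1 hm2
          have := hne (m + 1) (by omega) (by simpa using Nat.succ_lt_succ hm2)
          rw [htake m] at this
          intro h; apply this; omega
        · simp only [cobBal, List.map_cons, List.sum_cons] at *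
          omega

-- discrete intermediate value: if the running balance starts at 1 and never revisits 0, it stays ≥ 1
theorem cobPos_of_ne (l : List Char) (lo q : Nat) (hq : q < l.length)
    (hopen : l[lo]? = some '(')
    (hne : ∀ j, lo < j → j ≤ q → cobSeg l lo j ≠ 0) :
    ∀ j, lo < j → j ≤ q → 1 ≤ cobSeg l lo j := by
  have hstep : ∀ j, lo ≤ j → j < q → cobSeg l lo (j + 1) ≥ cobSeg l lo j - 1 := by
    intro j hj1 hj2
    rw [cobSeg_succ l hj1 (by omega)]
    have : cobW l[j] ≤ 1 ∧ -1 ≤ cobW l[j] := by unfold cobW; split_ifs; all_goals omega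
    omega
  have hlo : lo < l.length := by
    by_contra h
    rw [List.getElem?_eq_none (by omega)] at hopen
    simp at hopen
  have hbase : cobSeg l lo (lo + 1) = 1 := by
    rw [cobSeg_succ l le_rfl hlo, cobSeg_self]
    have : l[lo] = '(' := by
      rw [List.getElem?_eq_getElem hlo] at hopen
      injection hopen
    simp [this, cobW]
  intro j
  induction j with
  | zero => omega
  | succ j ihj =>
    intro hj1 hj2
    rcases Nat.lt_or_ge lo j with h | h
    · have hprev : 1 ≤ cobSeg l lo j := ihj h (by omega)
      have := hstep j (by omega) (by omega)
      have := hne (j + 1) (by omega) hj2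
      omega
    · have : j = lo := by omega
      subst this
      rw [hbase]

-- the layer test of B is exactly "lo and hi are a matching pair"
theorem cobLayer_iff (l : List Char) (lo hi : Nat) (hlh : lo < hi) (hhi : hi < l.length) :
    (l[lo]? = some '(' ∧ l[hi]? = some ')' ∧
      cobWin ((l.drop lo).take (hi + 1 - lo)) 0 = true) ↔ cobMatches l lo hi := by
  have hws_take : ∀ m : Nat, m ≤ hi + 1 - lo →
      ((l.drop lo).take (hi + 1 - lo)).take m = (l.drop lo).take m := by
    intro m hm
    rw [List.take_take]
    congr 1
    omega
  have hws_len : ((l.drop lo).take (hi + 1 - lo)).length = hi + 1 - lo := by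
    simp
    omega
  constructor
  · rintro ⟨hopen, hclose, hwin⟩
    rw [cobWin_iff] at hwin
    obtain ⟨hne, hfin⟩ := hwin
    simp only [zero_add] at hne hfin
    have hfin' : cobSeg l lo (hi + 1) = 0 := by
      unfold cobSeg
      rw [show hi + 1 - lo = hi + 1 - lo from rfl]
      exact hfin
    have hne' : ∀ j, lo < j → j ≤ hi → cobSeg l lo j ≠ 0 := by
      intro j hj1 hj2
      have := hne (j - lo) (by omega) (by omega)
      rw [hws_take (j - lo) (by omega)] at this
      simpa [cobSeg] using this
    exact ⟨hlh, hhi, hopen, cobPos_of_ne l lo hi hhi hopen hne', hfin'⟩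
  · intro hm
    obtain ⟨_, _, hopen, hpos, hfin⟩ := hm
    refine ⟨hopen, cobMatches_close ⟨hlh, hhi, hopen, hpos, hfin⟩, ?_⟩
    rw [cobWin_iff]
    simp only [zero_add]
    constructor
    · intro m hm1 hm2
      rw [hws_take m (by rw [hws_len] at hm2; omega)]
      have := hpos (lo + m) (by omega) (by rw [hws_len] at hm2; omega)
      simp only [cobSeg] at this
      have heq : lo + m - lo = m := by omega
      rw [heq] at this
      omega
    · simpa [cobSeg] using hfin

-- joint induction: A's index scan equals B's layer peeling
theorem cobScan_eq_layers (l : List Char) (d : PySem.Dict Int Int)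
    (hd : cobDInv l l.length d) :
    ∀ (fuel lo : Nat), l.length - lo ≤ fuel → (lo < l.length ∨ (lo = 0 ∧ l.length = 0)) →
      cobScan d (l.length : Int) (PySem.List.pyRange (lo : Int) (l.length : Int) 1) =
        cobLayers l lo (l.length - 1 - lo) (lo : Int) := by
  intro fuel
  induction fuel with
  | zero =>
    intro lo hfuel hlo
    have : l.length = 0 ∧ lo = 0 := by omega
    obtain ⟨hn, hl0⟩ := this
    subst hl0
    rw [PySem.List.pyRange_one_eq_nil (by omega)]
    simp [cobScan, cobLayers, hn]
  | succ fuel ih =>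
    intro lo hfuel hlo
    rcases hlo with hlo | ⟨hl0, hn0⟩
    · set n := l.length with hn
      have hcons : PySem.List.pyRange (lo : Int) (n : Int) 1 =
          (lo : Int) :: PySem.List.pyRange ((lo : Int) + 1) (n : Int) 1 :=
        PySem.List.pyRange_one_cons (by exact_mod_cast hlo)
      rw [hcons]
      set q : Nat := n - 1 - lo with hq
      have hcast : (n : Int) - (lo : Int) - 1 = (q : Int) := by
        push_cast [hq]; omega
      have hget : d.get? (lo : Int) = some ((n : Int) - (lo : Int) - 1) ↔ cobMatches l lo q := by
        rw [hcast, hd lo q]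
        constructor
        · rintro ⟨hm, _⟩; exact hm
        · intro hm; exact ⟨hm, by omega⟩
      simp only [cobScan]
      by_cases hmat : cobMatches l lo q
      · have hgets : d.get? (lo : Int) = some ((n : Int) - (lo : Int) - 1) := hget.mpr hmat
        rw [if_neg (by simpa using hgets)]
        have hloq : lo < q := hmat.1
        -- B takes the layer
        rw [cobLayers, dif_pos hloq]
        obtain ⟨hopen, hclose, hwin⟩ := (cobLayer_iff l lo q hloq (by omega)).mpr hmat
        rw [if_pos ⟨hopen, hclose⟩, if_pos hwin]
        have h1 : ((lo : Int) + 1) = ((lo + 1 : Nat) : Int) := by push_cast; ring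
        have h2 : q - 1 = n - 1 - (lo + 1) := by omega
        rw [h1, h2]
        exact ih (lo + 1) (by omega) (Or.inl (by omega))
      · have hgetn : ¬ d.get? (lo : Int) = some ((n : Int) - (lo : Int) - 1) := fun h => hmat (hget.mp h)
        rw [if_pos (by simpa using hgetn)]
        -- B breaks and returns count = lo
        rcases Nat.lt_or_ge lo q with hloq | hloq
        · rw [cobLayers, dif_pos hloq]
          by_cases hg : l[lo]? = some '(' ∧ l[q]? = some ')'
          · rw [if_pos hg]
            have hwin : ¬ cobWin ((l.drop lo).take (q + 1 - lo)) 0 = true := by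
              intro hw
              exact hmat ((cobLayer_iff l lo q hloq (by omega)).mp ⟨hg.1, hg.2, hw⟩)
            rw [if_neg hwin]
          · rw [if_neg hg]
        · rw [cobLayers, dif_neg (by omega)]
    · subst hl0
      rw [PySem.List.pyRange_one_eq_nil (by omega)]
      simp [cobScan, cobLayers, hn0]

-- ===== VERDICT (by name: the statement is the Claim_ definition above) =====
theorem count_outer_bracket_spec : Claim_equal_count_outer_bracket := by
  unfold Claim_equal_count_outer_bracket
  intro exp _ hpre
  unfold Spec_count_outer_bracket
  have hpre' : ∀ k, k ≤ exp.toList.length → 0 ≤ cobBal (exp.toList.take k) := hpre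
  obtain ⟨d, hbuild, hDinv⟩ := cobBuild_spec exp.toList hpre' exp.toList 0 [] PySem.Dict.empty rfl
    ⟨by simp [cobSeg_self], by intro m hm; simp at hm⟩
    (by
      intro p q
      simp only [PySem.Dict.get?_empty]
      constructor
      · intro h; simp at h
      · rintro ⟨_, hq⟩; omega)
  have hbuild' : cobBuild (PySem.List.enumerate exp.toList 0) [] PySem.Dict.empty = some d := by
    simpa using hbuild
  have hval : cobVal exp.toList 0 = true := by
    have := cobVal_of_pre exp.toList hpre' exp.toList 0 rfl
    simpa [cobSeg_self] using this
  simp only [count_outer_bracket, count_outer_bracket_alt, hbuild', hval, if_pos]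
  have := cobScan_eq_layers exp.toList d hDinv exp.toList.length 0 (by omega) (by omega)
  simpa using this
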